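-- pv_equiv track=rewrite | github.com/blamechris/archery-apprentice-docs | migrate-content-fixed.py | strip_old_frontmatter
-- ===== SOURCE A (Python) =====
-- def strip_old_frontmatter(content):
--     """
--     Strip existing frontmatter completely.
--     Handles both ---...--- and +++...+++ styles.
--     """
--     lines = content.split('\n')
--
--     # Check if file starts with frontmatter delimiter
--     if not lines or lines[0].strip() not in ['---', '+++']:
--         return content
--
--     delimiter = lines[0].strip()
--
--     # Find closing delimiter
--     for i in range(1, len(lines)):
--         if lines[i].strip() == delimiter:
--             # Return content after frontmatter (skip the closing delimiter line)
--             return '\n'.join(lines[i+1:])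
--
--     # If no closing delimiter found, return original content
--     return content
-- ===== SOURCE B (Python) =====
-- import re
--
-- # One anchored regex recognizes the whole frontmatter block:
-- #   an opening line that strips to '---' or '+++', a lazily-matched run of
-- #   lines, then the first line stripping to the same delimiter (backreference),
-- #   ending with its newline or the end of the string.
-- _FM_RE = re.compile(
--     r'[^\S\n]*(---|\+\+\+)[^\S\n]*\n'   # opening delimiter line
--     r'(?:[^\n]*\n)*?'                   # lazily skip intervening lines
--     r'[^\S\n]*\1[^\S\n]*(?:\n|\Z)'      # first closing delimiter line
-- )
--
-- def strip_old_frontmatter(content):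
--     """
--     Strip existing frontmatter completely.
--     Handles both ---...--- and +++...+++ styles.
--     """
--     m = _FM_RE.match(content)
--     return content[m.end():] if m else content
-- ===== Notes on version B (the rewrite author's own statement) =====
-- stated objective: idiomatic
-- what changed: B recognizes the whole frontmatter block with one anchored backreferencing regex (opening delimiter line, lazily skipped lines, first matching closing line) and slices the string at the match end, instead of A's splitting into a line list, indexed scan for the closing delimiter, and re-join of the tail lines.
import Mathlib
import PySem

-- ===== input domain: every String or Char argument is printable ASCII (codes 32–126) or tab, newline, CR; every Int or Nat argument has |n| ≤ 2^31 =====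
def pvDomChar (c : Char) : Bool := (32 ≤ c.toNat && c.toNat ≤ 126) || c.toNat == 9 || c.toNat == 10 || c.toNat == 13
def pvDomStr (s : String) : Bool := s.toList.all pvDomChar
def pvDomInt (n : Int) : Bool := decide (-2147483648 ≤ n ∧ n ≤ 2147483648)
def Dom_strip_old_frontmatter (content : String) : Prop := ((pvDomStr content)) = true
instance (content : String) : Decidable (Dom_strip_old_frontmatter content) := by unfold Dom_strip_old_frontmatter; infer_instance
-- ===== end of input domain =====

-- B matches one anchored backreferencing regex over the raw string and slices at the
-- match end, instead of A's split('\n') into a line list, index scan and join ('idiomatic').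

-- ===== PORT A =====
-- A's 'for i in range(1, len(lines)): if lines[i].strip() == delimiter: return "\n".join(lines[i+1:])'
-- as structural recursion over the lines after the first: lines after the first match, or none.
def aFind (delim : List Char) : List (List Char) → Option (List (List Char))
  | [] => none
  | l :: ls => if PySem.Chars.strip l = delim then some ls else aFind delim ls

def strip_old_frontmatter (content : String) : String :=
  match PySem.Chars.splitOn content.toList ['\n'] with
  | [] => content
  | l0 :: rest =>
    if PySem.Chars.strip l0 = "---".toList ∨ PySem.Chars.strip l0 = "+++".toList then
      match aFind (PySem.Chars.strip l0) rest with
      | some tail => String.mk (PySem.Chars.join ['\n'] tail)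
      | none => content
    else content

-- ===== PORT B =====
-- Source B matches ONE regex: r'[^\S\n]*(---|\+\+\+)[^\S\n]*\n(?:[^\n]*\n)*?[^\S\n]*\1[^\S\n]*(?:\n|\Z)'
-- anchored at the start (re.match), and returns content[m.end():] on a match, else content.
-- The functions below are that regex's exact semantics for this pattern (exact because each
-- greedy class run [^\S\n]* is followed by a token outside the class — '-', '+', '\n' or the
-- string end — so the engine never backtracks into it, and each lazy step (?:[^\n]*\n)
-- consumes exactly one line):

-- the character class [^\S\n]: whitespace other than '\n'
-- [^\S\n]* : greedy run of the class
def chompB : List Char → List Char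
  | [] => []
  | c :: cs => if PySem.Chars.isspace c && c != '\n' then chompB cs else c :: cs

-- a literal token (the delimiter '---' / '+++' or its backreference \1)
def litB : List Char → List Char → Option (List Char)
  | [], s => some s
  | _ :: _, [] => none
  | p :: ps, c :: cs => if c = p then litB ps cs else none

-- one delimiter line: [^\S\n]* d [^\S\n]* followed by '\n' (or, if acceptEnd, by \Z);
-- returns the text after the newline (after m.end())
def delimLineB (d : List Char) (acceptEnd : Bool) (s : List Char) : Option (List Char) :=
  match litB d (chompB s) with
  | none => none
  | some r =>
    match chompB r with
    | [] => if acceptEnd then some [] else none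
    | c :: t => if c = '\n' then some t else none

-- one lazy step (?:[^\n]*\n): skip past the next '\n'
def dropLineB : List Char → Option (List Char)
  | [] => none
  | c :: cs => if c = '\n' then some cs else dropLineB cs

theorem dropLineB_length_lt (s : List Char) (r : List Char) (h : dropLineB s = some r) :
    r.length < s.length := by
  induction s with
  | nil => simp [dropLineB] at h
  | cons c cs ih =>
    by_cases hc : c = '\n'
    · simp only [dropLineB, if_pos hc, Option.some.injEq] at h
      subst h; simp
    · simp only [dropLineB, if_neg hc] at h
      exact Nat.lt_succ_of_lt (ih h)

-- the lazy group followed by the closing delimiter line: try the closing line at this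
-- line start (zero lazy steps), otherwise take one lazy step and retry
def findCloseB (d : List Char) (s : List Char) : Option (List Char) :=
  match delimLineB d true s with
  | some r => some r
  | none =>
    match h : dropLineB s with
    | some rest => findCloseB d rest
    | none => none
termination_by s.length
decreasing_by exact dropLineB_length_lt s _ h

-- the opening line [^\S\n]*(---|\+\+\+)[^\S\n]*\n — alternation tries '---' first
def openLineB (s : List Char) : Option (List Char × List Char) :=
  match delimLineB ['-', '-', '-'] false s with
  | some t => some (['-', '-', '-'], t)
  | none =>
    match delimLineB ['+', '+', '+'] false s with
    | some t => some (['+', '+', '+'], t)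
    | none => none

def strip_old_frontmatter_alt (content : String) : String :=
  match openLineB content.toList with
  | none => content
  | some (d, rest) =>
    match findCloseB d rest with
    | some tail => String.mk tail
    | none => content

-- ===== PRECONDITION & SPEC =====
def Spec_strip_old_frontmatter (content : String) (out : String) : Prop := out = strip_old_frontmatter_alt content
instance (content : String) (out : String) : Decidable (Spec_strip_old_frontmatter content out) := by unfold Spec_strip_old_frontmatter; infer_instance

-- ===== CLAIM (what is proved, stated in full; the proofs are below) =====
def Claim_equal_strip_old_frontmatter : Prop := ∀ (content : String), Dom_strip_old_frontmatter content → Spec_strip_old_frontmatter content (strip_old_frontmatter content)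

-- ===== LEMMAS AND PROOFS =====

-- splitting on '\n' phrased through one partition step
def partNl : List Char → List Char × Bool × List Char
  | [] => ([], false, [])
  | c :: cs =>
    if c = '\n' then ([], true, cs)
    else (c :: (partNl cs).1, (partNl cs).2.1, (partNl cs).2.2)

theorem partNl_rest_lt (cs : List Char) (h : (partNl cs).2.1 = true) :
    (partNl cs).2.2.length < cs.length := by
  induction cs with
  | nil => simp [partNl] at h
  | cons c cs ih =>
    by_cases hc : c = '\n'
    · simp [partNl, hc]
    · simp only [partNl, if_neg hc] at h ⊢
      exact Nat.lt_succ_of_lt (ih h)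

def mySplit (l : List Char) : List (List Char) :=
  if h : (partNl l).2.1 = true then (partNl l).1 :: mySplit (partNl l).2.2 else [(partNl l).1]
termination_by l.length
decreasing_by exact partNl_rest_lt l h

theorem mySplit_ne_nil (l : List Char) : mySplit l ≠ [] := by
  rw [mySplit]; split <;> simp

theorem partNl_false (l : List Char) (h : (partNl l).2.1 = false) :
    (partNl l).1 = l ∧ (partNl l).2.2 = [] := by
  induction l with
  | nil => simp [partNl]
  | cons c cs ih =>
    by_cases hc : c = '\n'
    · simp [partNl, hc] at h
    · simp only [partNl, if_neg hc] at h ⊢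
      exact ⟨by rw [(ih h).1], (ih h).2⟩

theorem partNl_true (l : List Char) (h : (partNl l).2.1 = true) :
    l = (partNl l).1 ++ '\n' :: (partNl l).2.2 := by
  induction l with
  | nil => simp [partNl] at h
  | cons c cs ih =>
    by_cases hc : c = '\n'
    · simp [partNl, hc]
    · simp only [partNl, if_neg hc] at h ⊢
      exact congrArg (c :: ·) (ih h)

theorem partNl_fst_no_nl (l : List Char) : '\n' ∉ (partNl l).1 := by
  induction l with
  | nil => simp [partNl]
  | cons c cs ih =>
    by_cases hc : c = '\n'
    · simp [partNl, hc]
    · simp only [partNl, if_neg hc]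
      simp [Ne.symm hc, ih]

theorem intercalate_nl_cons (x y : List Char) (ys : List (List Char)) :
    List.intercalate ['\n'] (x :: y :: ys) = x ++ '\n' :: List.intercalate ['\n'] (y :: ys) := by
  simp [List.intercalate]

theorem join_mySplit (l : List Char) : PySem.Chars.join ['\n'] (mySplit l) = l := by
  rw [mySplit]
  by_cases h : (partNl l).2.1 = true
  · rw [dif_pos h]
    rcases hsp : mySplit (partNl l).2.2 with _ | ⟨y, ys⟩
    · exact absurd hsp (mySplit_ne_nil _)
    · have ih := join_mySplit (partNl l).2.2
      rw [hsp] at ih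
      rw [PySem.Chars.join, intercalate_nl_cons, ← PySem.Chars.join, ih]
      exact (partNl_true l h).symm
  · rw [dif_neg h]
    have h1 := (partNl_false l (by simpa using h)).1
    simp [PySem.Chars.join, List.intercalate, h1]
termination_by l.length
decreasing_by exact partNl_rest_lt l h

theorem splitOn_go_spec : ∀ (fuel : Nat) (l : List Char), l.length < fuel → ∀ (cur : List Char) (acc : List (List Char)),
    PySem.Chars.splitOn.go ['\n'] fuel l cur acc =
      acc.reverse ++ (cur.reverse ++ (partNl l).1) ::
        (if (partNl l).2.1 = true then mySplit (partNl l).2.2 else []) := by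
  intro fuel
  induction fuel with
  | zero => intro l h; omega
  | succ fuel ih =>
    intro l h cur acc
    cases l with
    | nil =>
      simp [PySem.Chars.splitOn.go, partNl]
    | cons c cs =>
      by_cases hc : c = '\n'
      · subst hc
        rw [PySem.Chars.splitOn.go]
        rw [if_pos (by simp [List.isPrefixOf])]
        simp only [List.length_cons] at h
        simp only [List.length_singleton, List.drop_succ_cons, List.drop_zero]
        rw [ih cs (by omega)]
        simp only [partNl, if_pos rfl, List.reverse_cons, List.reverse_nil, List.nil_append,
          List.append_assoc, List.cons_append]
        conv_rhs => rw [mySplit]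
        by_cases h2 : (partNl cs).2.1 = true <;> simp [h2]
      · rw [PySem.Chars.splitOn.go]
        rw [if_neg (by simp [List.isPrefixOf_iff_prefix, List.prefix_cons_iff, Ne.symm hc])]
        simp only [List.length_cons] at h
        rw [ih cs (by omega)]
        simp only [partNl, if_neg hc]
        simp

theorem splitOn_eq_mySplit (l : List Char) :
    PySem.Chars.splitOn l ['\n'] = mySplit l := by
  rw [PySem.Chars.splitOn, splitOn_go_spec (l.length + 1) l (by omega)]
  conv_rhs => rw [mySplit]
  by_cases h : (partNl l).2.1 = true <;> simp [h]

-- the regex character class as a predicate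
def wsB (c : Char) : Bool := PySem.Chars.isspace c && c != '\n'

theorem chompB_eq_dropWhile (l : List Char) : chompB l = l.dropWhile wsB := by
  induction l with
  | nil => simp [chompB]
  | cons c cs ih =>
    by_cases hc : wsB c = true
    · rw [List.dropWhile_cons, if_pos hc]
      unfold wsB at hc
      simp only [chompB, hc, if_pos]
      exact ih
    · rw [List.dropWhile_cons, if_neg hc]
      unfold wsB at hc
      simp only [chompB, hc, Bool.not_eq_true] at *
      simp [hc]

theorem litB_eq_some_iff (d s r : List Char) : litB d s = some r ↔ s = d ++ r := by
  induction d generalizing s with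
  | nil => simp [litB]
  | cons p ps ih =>
    cases s with
    | nil => simp [litB]
    | cons c cs =>
      by_cases hc : c = p
      · subst hc; simp [litB, ih]
      · simp [litB, hc, Ne.symm hc]

theorem dropWhile_wsB_of_no_nl (l : List Char) (h : '\n' ∉ l) :
    l.dropWhile wsB = l.dropWhile PySem.Chars.isspace := by
  induction l with
  | nil => rfl
  | cons c cs ih =>
    have hc : c ≠ '\n' := fun e => h (by simp [e])
    have ih' := ih (fun hm => h (List.mem_cons_of_mem _ hm))
    rw [List.dropWhile_cons, List.dropWhile_cons]
    by_cases hp : PySem.Chars.isspace c = true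
    · simp [wsB, hp, hc, ih']
    · simp [wsB, hp]

theorem dropWhile_append_all (q : Char → Bool) (a b : List Char) (h : ∀ c ∈ a, q c = true) :
    List.dropWhile q (a ++ b) = List.dropWhile q b := by
  rw [List.dropWhile_append, List.dropWhile_eq_nil_iff.2 h]
  simp

theorem rstrip_append_ws (d w : List Char) (hne : d ≠ [])
    (hlast : PySem.Chars.isspace (d.getLast hne) = false)
    (hw : ∀ c ∈ w, PySem.Chars.isspace c = true) :
    PySem.Chars.rstrip (d ++ w) = d := by
  unfold PySem.Chars.rstrip
  rw [List.reverse_append, dropWhile_append_all _ _ _ (by simpa using hw)]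
  rcases hrev : d.reverse with _ | ⟨c, cs⟩
  · exact absurd (by simpa using hrev) hne
  · have hcd : PySem.Chars.isspace c = false := by
      have h1 : d.reverse.head? = some c := by rw [hrev]; rfl
      rw [List.head?_reverse, List.getLast?_eq_getLast hne] at h1
      rw [Option.some.injEq] at h1
      rw [← h1]
      exact hlast
    rw [List.dropWhile_cons, hcd]
    simp only [Bool.false_eq_true, if_false]
    rw [← hrev, List.reverse_reverse]

theorem strip_decomp (l d : List Char) (h : PySem.Chars.strip l = d) :
    ∃ w2, l.dropWhile PySem.Chars.isspace = d ++ w2 ∧ ∀ c ∈ w2, PySem.Chars.isspace c = true := by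
  have h1 : PySem.Chars.rstrip (l.dropWhile PySem.Chars.isspace) = d := h
  set l1 := l.dropWhile PySem.Chars.isspace with hl1
  unfold PySem.Chars.rstrip at h1
  refine ⟨(List.takeWhile PySem.Chars.isspace l1.reverse).reverse, ?_, ?_⟩
  · have h2 : List.dropWhile PySem.Chars.isspace l1.reverse = d.reverse := by
      rw [← h1]; simp
    calc l1 = l1.reverse.reverse := by simp
      _ = (List.takeWhile PySem.Chars.isspace l1.reverse ++
            List.dropWhile PySem.Chars.isspace l1.reverse).reverse := by
            rw [List.takeWhile_append_dropWhile]
      _ = d ++ (List.takeWhile PySem.Chars.isspace l1.reverse).reverse := by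
            rw [h2]; simp
  · intro c hc
    exact List.mem_takeWhile_imp (by simpa using hc)

theorem delimLineB_aux (d l m : List Char) (b : Bool)
    (hnl : '\n' ∉ l)
    (hm : m = [] ∨ ∃ t, m = '\n' :: t)
    (hne : d ≠ [])
    (hdnl : '\n' ∉ d)
    (hlast : PySem.Chars.isspace (d.getLast hne) = false) :
    delimLineB d b (l ++ m) =
      if PySem.Chars.strip l = d then
        (match m with
         | [] => if b then some [] else none
         | _ :: t => some t)
      else none := by
  have hmnw : List.dropWhile wsB m = m := by
    rcases hm with rfl | ⟨t, rfl⟩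
    · rfl
    · rw [List.dropWhile_cons]; simp [wsB]
  by_cases hs : PySem.Chars.strip l = d
  · rw [if_pos hs]
    obtain ⟨w2, hw2eq, hw2⟩ := strip_decomp l d hs
    have hw2nl : '\n' ∉ w2 := by
      intro hmem
      apply hnl
      have h3 : '\n' ∈ l.dropWhile PySem.Chars.isspace := by rw [hw2eq]; simp [hmem]
      exact (List.dropWhile_sublist _).mem h3
    have hchomp : chompB (l ++ m) = d ++ (w2 ++ m) := by
      rw [chompB_eq_dropWhile, List.dropWhile_append, dropWhile_wsB_of_no_nl l hnl, hw2eq]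
      have hie : (d ++ w2).isEmpty = false := by
        rcases d with _ | ⟨c, cs⟩
        · exact absurd rfl hne
        · rfl
      rw [hie]
      simp
    have hw2all : ∀ c ∈ w2, wsB c = true := by
      intro c hc
      have hcnl : c ≠ '\n' := fun e => hw2nl (e ▸ hc)
      simp [wsB, hw2 c hc, hcnl]
    have hrest : chompB (w2 ++ m) = m := by
      rw [chompB_eq_dropWhile, dropWhile_append_all _ _ _ hw2all, hmnw]
    unfold delimLineB
    rw [hchomp, (litB_eq_some_iff d (d ++ (w2 ++ m)) (w2 ++ m)).2 rfl]
    dsimp only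
    rcases hm with rfl | ⟨t, rfl⟩
    · rw [hrest]
    · rw [hrest]; simp
  · rw [if_neg hs]
    unfold delimLineB
    rw [chompB_eq_dropWhile, List.dropWhile_append, dropWhile_wsB_of_no_nl l hnl]
    obtain ⟨c0, d', rfl⟩ := List.exists_cons_of_ne_nil hne
    have hc0nl : c0 ≠ '\n' := fun e => hdnl (by simp [e])
    rcases hl1 : List.dropWhile PySem.Chars.isspace l with _ | ⟨x, xs⟩
    · simp only [List.isEmpty_nil, if_true, hmnw]
      rcases hm with rfl | ⟨t, rfl⟩
      · rfl
      · simp [litB, Ne.symm hc0nl]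
    · simp only [List.isEmpty_cons, Bool.false_eq_true, if_false]
      rcases hlit : litB (c0 :: d') ((x :: xs) ++ m) with _ | r
      · rfl
      · have heq : (x :: xs) ++ m = (c0 :: d') ++ r := (litB_eq_some_iff _ _ _).1 hlit
        have hw' : ∃ w', x :: xs = (c0 :: d') ++ w' ∧ r = w' ++ m := by
          rcases List.append_eq_append_iff.1 heq with ⟨a', ha1, ha2⟩ | ⟨c', hc1, hc2⟩
          · rcases a' with _ | ⟨y, ys⟩
            · exact ⟨[], by simpa using ha1.symm, by simpa using ha2.symm⟩
            · exfalso
              rcases hm with rfl | ⟨t, rfl⟩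
              · simp at ha2
              · simp only [List.cons_append, List.cons.injEq] at ha2
                exact hdnl (by rw [ha1, ha2.1]; simp)
          · exact ⟨c', hc1, hc2⟩
        obtain ⟨w', hw1, rfl⟩ := hw'
        have hw'nl : '\n' ∉ w' := by
          intro hmem
          apply hnl
          have h4 : '\n' ∈ x :: xs := by rw [hw1]; simp [hmem]
          rw [← hl1] at h4
          exact (List.dropWhile_sublist _).mem h4
        rcases hdw : List.dropWhile wsB w' with _ | ⟨y0, rest⟩
        · exfalso
          have hall := List.dropWhile_eq_nil_iff.1 hdw
          have hallp : ∀ c ∈ w', PySem.Chars.isspace c = true := by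
            intro c hc
            have hw := hall c hc
            simp [wsB] at hw
            exact hw.1
          apply hs
          show PySem.Chars.rstrip (List.dropWhile PySem.Chars.isspace l) = _
          rw [hl1, hw1]
          exact rstrip_append_ws _ _ hne hlast hallp
        · have hy0 : wsB y0 = false := by
            have h2 : List.dropWhile wsB w' ≠ [] := by simp [hdw]
            have := List.head_dropWhile_not wsB h2
            simp only [hdw, List.head_cons] at this
            simpa using this
          have hy0nl : y0 ≠ '\n' := by
            intro e
            apply hw'nl
            rw [← e]
            exact (List.dropWhile_sublist _).mem (by rw [hdw]; simp)
          have hch : chompB (w' ++ m) = y0 :: (rest ++ m) := by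
            rw [chompB_eq_dropWhile, List.dropWhile_append, hdw]
            simp
          dsimp only
          rw [hch]
          simp [hy0nl]

-- the heart: a delimiter-line match over one physical line is exactly 'line.strip() == d'
theorem delimLineB_spec (d l m : List Char) (b : Bool)
    (hnl : '\n' ∉ l)
    (hm : m = [] ∨ ∃ t, m = '\n' :: t)
    (hd : d = "---".toList ∨ d = "+++".toList) :
    delimLineB d b (l ++ m) =
      if PySem.Chars.strip l = d then
        (match m with
         | [] => if b then some [] else none
         | _ :: t => some t)
      else none := by
  rcases hd with rfl | rfl
  · exact delimLineB_aux _ l m b hnl hm (by decide) (by decide) (by decide)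
  · exact delimLineB_aux _ l m b hnl hm (by decide) (by decide) (by decide)

theorem dropLineB_eq (s : List Char) :
    dropLineB s = if (partNl s).2.1 = true then some (partNl s).2.2 else none := by
  induction s with
  | nil => simp [dropLineB, partNl]
  | cons c cs ih =>
    by_cases hc : c = '\n'
    · simp [dropLineB, partNl, hc]
    · simp only [dropLineB, partNl, if_neg hc]
      exact ih

-- the closing-line matcher at one line start, in terms of that line's strip()
theorem delimLineB_true_eq (d : List Char) (s : List Char)
    (hd : d = "---".toList ∨ d = "+++".toList) :
    delimLineB d true s =
      if PySem.Chars.strip (partNl s).1 = d then some ((partNl s).2.2) else none := by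
  by_cases hf : (partNl s).2.1 = true
  · conv_lhs => rw [partNl_true s hf]
    rw [delimLineB_spec d _ _ true (partNl_fst_no_nl s) (Or.inr ⟨_, rfl⟩) hd]
  · obtain ⟨h1, h2⟩ := partNl_false s (by simpa using hf)
    conv_lhs => rw [show s = (partNl s).1 ++ [] by simp [h1]]
    rw [delimLineB_spec d _ _ true (partNl_fst_no_nl s) (Or.inl rfl) hd, h2]
    split <;> rfl

theorem findCloseB_eq (d : List Char) (s : List Char)
    (hd : d = "---".toList ∨ d = "+++".toList) :
    findCloseB d s = (aFind d (mySplit s)).map (PySem.Chars.join ['\n']) := by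
  rw [findCloseB, delimLineB_true_eq d s hd]
  conv_rhs => rw [mySplit]
  by_cases hst : PySem.Chars.strip (partNl s).1 = d
  · rw [if_pos hst]
    dsimp only
    by_cases hf : (partNl s).2.1 = true
    · rw [dif_pos hf]
      simp only [aFind, if_pos hst, Option.map_some]
      rw [join_mySplit]
    · rw [dif_neg hf]
      obtain ⟨_, h2⟩ := partNl_false s (by simpa using hf)
      simp only [aFind, if_pos hst, Option.map_some, h2]
      simp [PySem.Chars.join, List.intercalate]
  · rw [if_neg hst]
    dsimp only
    split
    · next rest heq =>
      rw [dropLineB_eq] at heq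
      split_ifs at heq with hf
      rw [Option.some.injEq] at heq
      subst heq
      rw [dif_pos hf]
      simp only [aFind, if_neg hst]
      exact findCloseB_eq d _ hd
    · next heq =>
      rw [dropLineB_eq] at heq
      split_ifs at heq with hf
      rw [dif_neg hf]
      simp [aFind, hst]
termination_by s.length
decreasing_by
  exact partNl_rest_lt s hf

-- the opening-line matcher in terms of the first line's strip()
theorem openLineB_eq (s : List Char) :
    openLineB s =
      if (partNl s).2.1 = true then
        (if PySem.Chars.strip (partNl s).1 = "---".toList then some ("---".toList, (partNl s).2.2)
         else if PySem.Chars.strip (partNl s).1 = "+++".toList then some ("+++".toList, (partNl s).2.2)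
         else none)
      else none := by
  have hgen : ∀ d, d = "---".toList ∨ d = "+++".toList →
      delimLineB d false s =
        if (partNl s).2.1 = true then
          (if PySem.Chars.strip (partNl s).1 = d then some ((partNl s).2.2) else none)
        else none := by
    intro d hd
    by_cases hf : (partNl s).2.1 = true
    · rw [if_pos hf]
      conv_lhs => rw [partNl_true s hf]
      rw [delimLineB_spec d _ _ false (partNl_fst_no_nl s) (Or.inr ⟨_, rfl⟩) hd]
    · rw [if_neg hf]
      obtain ⟨h1, _⟩ := partNl_false s (by simpa using hf)
      conv_lhs => rw [show s = (partNl s).1 ++ [] by simp [h1]]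
      rw [delimLineB_spec d _ _ false (partNl_fst_no_nl s) (Or.inl rfl) hd]
      split <;> rfl
  unfold openLineB
  rw [show ['-', '-', '-'] = "---".toList by decide, show ['+', '+', '+'] = "+++".toList by decide]
  rw [hgen _ (Or.inl rfl), hgen _ (Or.inr rfl)]
  by_cases hf : (partNl s).2.1 = true
  · simp only [hf, if_true]
    by_cases h3 : PySem.Chars.strip (partNl s).1 = "---".toList
    · simp [h3]
    · by_cases h4 : PySem.Chars.strip (partNl s).1 = "+++".toList
      · simp [h4]
      · have h3' : ¬ PySem.Chars.strip (partNl s).1 = ['-', '-', '-'] := by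
          rwa [show "---".toList = ['-', '-', '-'] from by decide] at h3
        have h4' : ¬ PySem.Chars.strip (partNl s).1 = ['+', '+', '+'] := by
          rwa [show "+++".toList = ['+', '+', '+'] from by decide] at h4
        simp [h3', h4']
  · simp [hf]

-- ===== VERDICT (by name: the statement is the Claim_ definition above) =====
theorem strip_old_frontmatter_spec : Claim_equal_strip_old_frontmatter := by
  intro content _
  unfold Spec_strip_old_frontmatter strip_old_frontmatter strip_old_frontmatter_alt
  rw [splitOn_eq_mySplit, openLineB_eq]
  conv_lhs => rw [mySplit]
  by_cases hf : (partNl content.toList).2.1 = true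
  · rw [dif_pos hf]
    rw [if_pos hf]
    dsimp only
    by_cases h3 : PySem.Chars.strip (partNl content.toList).1 = "---".toList
    · rw [if_pos (Or.inl h3), if_pos h3, h3]
      dsimp only
      rw [findCloseB_eq _ _ (Or.inl rfl)]
      cases aFind "---".toList (mySplit (partNl content.toList).2.2) <;> rfl
    · rw [if_neg h3]
      by_cases h4 : PySem.Chars.strip (partNl content.toList).1 = "+++".toList
      · rw [if_pos (Or.inr h4), if_pos h4, h4]
        dsimp only
        rw [findCloseB_eq _ _ (Or.inr rfl)]
        cases aFind "+++".toList (mySplit (partNl content.toList).2.2) <;> rfl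
      · rw [if_neg h4, if_neg (by tauto)]
  · rw [dif_neg hf]
    rw [if_neg (by simpa using hf)]
    dsimp only
    by_cases h3 : PySem.Chars.strip (partNl content.toList).1 = "---".toList ∨
        PySem.Chars.strip (partNl content.toList).1 = "+++".toList
    · rw [if_pos h3]
      rfl
    · rw [if_neg h3]
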